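-- pv_equiv track=rewrite | github.com/dbt-checkpoint/dbt-checkpoint | dbt_checkpoint/replace_script_table_names.py | get_source_from_name
-- ===== SOURCE A (Python) =====
-- from typing import Any, Dict, Generator, Optional, Sequence, Set, Tuple
--
-- def get_source_from_name(
--     manifest: Dict[str, Any], tables: Set[str]
-- ) -> Generator[Tuple[str, str], None, None]:
--     if tables:
--         table_names = {table: set(table.split(".")) for table in tables}
--         sources = manifest.get("sources", {})
--         for _, value in sources.items():
--             source = {value.get("database"), value.get("schema"), value.get("name")}
--             table = None  # pragma: no mutate
--             for table_name, table_split in table_names.items():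
--                 if source.issuperset(table_split):
--                     table = table_name
--             if table:
--                 tables.remove(table)
--                 source_ref = "{{ source('%s', '%s') }}" % (
--                     value.get("source_name"),
--                     value.get("name"),
--                 )
--                 yield (table, source_ref)
-- ===== SOURCE B (Python) =====
-- # B: instead of testing every table against every source with a subset test,
-- # index each table once by the sorted tuple of its dot-split parts, then for each
-- # source enumerate the <=8 subsets of its (deduplicated) field values and resolve
-- # them through the index.
-- # Like A, consumed tables are removed from the `tables` set (same side effect).
-- def get_source_from_name(manifest, tables):
--     index = {}
--     for t in tables:
--         index[tuple(sorted(set(t.split("."))))] = t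
--     for value in manifest.get("sources", {}).values():
--         fields = []
--         for f in (value.get("database"), value.get("schema"), value.get("name")):
--             if f is not None and f not in fields:
--                 fields.append(f)
--         subsets = [[]]
--         for f in fields:
--             subsets = subsets + [s + [f] for s in subsets]
--         found = None
--         for s in subsets:
--             t = index.get(tuple(sorted(s)))
--             if t is not None:
--                 found = t
--         if found:
--             tables.remove(found)
--             yield (found, "{{ source('%s', '%s') }}" % (value.get("source_name"), value.get("name")))
-- ===== Notes on version B (the rewrite author's own statement) =====
-- stated objective: alternative
-- what changed: B replaces A's per-source linear scan over all tables (a set-superset test per pair) by a dict index keyed by each table's sorted split-set, resolved by probing the <=8 subsets of each source's deduplicated field values.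
import Mathlib
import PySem

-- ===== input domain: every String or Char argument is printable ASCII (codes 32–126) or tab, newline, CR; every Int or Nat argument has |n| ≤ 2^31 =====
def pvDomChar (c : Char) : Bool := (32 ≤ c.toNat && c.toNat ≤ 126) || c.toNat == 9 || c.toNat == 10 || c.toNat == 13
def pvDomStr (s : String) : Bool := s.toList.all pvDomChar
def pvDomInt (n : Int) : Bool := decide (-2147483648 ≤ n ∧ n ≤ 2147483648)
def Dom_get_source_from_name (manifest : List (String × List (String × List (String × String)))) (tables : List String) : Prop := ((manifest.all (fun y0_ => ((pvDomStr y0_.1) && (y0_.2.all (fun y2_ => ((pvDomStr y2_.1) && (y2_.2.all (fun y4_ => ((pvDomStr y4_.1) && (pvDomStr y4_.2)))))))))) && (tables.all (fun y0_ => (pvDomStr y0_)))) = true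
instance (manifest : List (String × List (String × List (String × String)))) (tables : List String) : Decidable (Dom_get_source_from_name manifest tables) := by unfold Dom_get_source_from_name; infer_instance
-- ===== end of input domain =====

-- ===== PORT A =====
-- B replaces A's per-source scan over every table by a hash index keyed by each
-- table's sorted split-set, probed with the subsets of each source's field set.
-- Equivalence is about the RETURN value only: both Pythons also remove each
-- yielded table from the `tables` set (the same side effect in A and B).

-- '%s' % v for an Optional[str] value
def pvStrPct (o : Option String) : String := match o with | some s => s | none => "None"

-- t.split(".")  (separator is the non-empty literal ".", so split? is always `some`)
def pvSplitDot (t : String) : List String := (PySem.Str.split? t ".").getD []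

-- "{{ source('%s', '%s') }}" % (value.get("source_name"), value.get("name"))
def pvSrcRef (value : List (String × String)) : String :=
  "{{ source('" ++ pvStrPct ((PySem.Dict.mk value).get? "source_name") ++ "', '"
    ++ pvStrPct ((PySem.Dict.mk value).get? "name") ++ "') }}"

-- {value.get("database"), value.get("schema"), value.get("name")}
def pvSourceSet (value : List (String × String)) : PySem.Set (Option String) :=
  PySem.Set.ofList [(PySem.Dict.mk value).get? "database", (PySem.Dict.mk value).get? "schema",
    (PySem.Dict.mk value).get? "name"]

-- {table: set(table.split(".")) for table in tables}
def pvTableNames (tables : List String) : PySem.Dict String (List String) :=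
  tables.foldl (fun d t => d.insert t (PySem.Set.ofList (pvSplitDot t))) PySem.Dict.empty

-- the inner `for table_name, table_split in table_names.items(): if source.issuperset(...)` loop
def pvPickA (table_names : PySem.Dict String (List String)) (value : List (String × String)) :
    Option String :=
  table_names.items.foldl
    (fun tb p => if PySem.Set.issuperset (pvSourceSet value) (p.2.map some) then some p.1 else tb)
    none

-- `if table: ... yield (table, source_ref)` (None and "" are falsy; tables.remove only
-- mutates the argument and never changes what is yielded)
def pvEmit (table : Option String) (value : List (String × String))
    (acc : List (String × String)) : List (String × String) :=
  match table with
  | some t => if t ≠ "" then acc ++ [(t, pvSrcRef value)] else acc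
  | none => acc

def get_source_from_name (manifest : List (String × List (String × List (String × String)))) (tables : List String) : List (String × String) :=
  if tables.isEmpty then []
  else
    let sources : List (String × List (String × String)) :=
      ((PySem.Dict.mk manifest).get? "sources").getD []
    (PySem.Dict.mk sources).items.foldl
      (fun acc kv => pvEmit (pvPickA (pvTableNames tables) kv.2) kv.2 acc) []

-- ===== PORT B =====
-- tuple(sorted(set(t.split("."))))
def pvKey (t : String) : List String :=
  PySem.List.sorted (PySem.Set.ofList (pvSplitDot t)) (fun x => x)

-- the index: {tuple(sorted(set(t.split(".")))): t for t in tables}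
def pvIndex (tables : List String) : PySem.Dict (List String) String :=
  tables.foldl (fun d t => d.insert (pvKey t) t) PySem.Dict.empty

-- the deduplicated non-None field values, in order
def pvFields (value : List (String × String)) : List String :=
  [(PySem.Dict.mk value).get? "database", (PySem.Dict.mk value).get? "schema",
    (PySem.Dict.mk value).get? "name"].foldl
    (fun fs o => match o with
      | some f => if fs.contains f then fs else fs ++ [f]
      | none => fs) []

-- subsets = [[]]; for f in fields: subsets = subsets + [s + [f] for s in subsets]
def pvSubsets (fields : List String) : List (List String) :=
  fields.foldl (fun acc f => acc ++ acc.map (fun s => s ++ [f])) [[]]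

-- loop body: t = index.get(tuple(sorted(s))); if t is not None: found = t
def pvStep (index : PySem.Dict (List String) String) (fnd : Option String)
    (s : List String) : Option String :=
  match index.get? (PySem.List.sorted s (fun x => x)) with
  | some t => some t
  | none => fnd

-- the `for s in subsets:` loop
def pvPickB (index : PySem.Dict (List String) String) (value : List (String × String)) :
    Option String :=
  (pvSubsets (pvFields value)).foldl (pvStep index) none

def get_source_from_name_alt (manifest : List (String × List (String × List (String × String)))) (tables : List String) : List (String × String) :=
  let sources : List (String × List (String × String)) :=
    ((PySem.Dict.mk manifest).get? "sources").getD []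
  (PySem.Dict.mk sources).values.foldl
    (fun acc value => pvEmit (pvPickB (pvIndex tables) value) value acc) []

-- ===== PRECONDITION & SPEC =====
-- table `t` matches source `value`: every part of t.split(".") is one of the three field values
def pvMatches (value : List (String × String)) (t : String) : Bool :=
  (pvSplitDot t).all (fun x =>
    [(PySem.Dict.mk value).get? "database", (PySem.Dict.mk value).get? "schema",
      (PySem.Dict.mk value).get? "name"].contains (some x))

-- Pre_ excludes (a) inputs where one source's fields match several tables — A's pick among
-- them depends on Python's hash-based set iteration order, so neither value is specified —
-- and (b) inputs where one non-empty table is matched by several sources, on which A raises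
-- KeyError on the second tables.remove.
def Pre_get_source_from_name (manifest : List (String × List (String × List (String × String)))) (tables : List String) : Prop :=
  (∀ kv ∈ (PySem.Dict.mk (((PySem.Dict.mk manifest).get? "sources").getD [])).items,
      (tables.filter (fun t => pvMatches kv.2 t)).length ≤ 1)
  ∧ (∀ t ∈ tables, t ≠ "" →
      ((PySem.Dict.mk (((PySem.Dict.mk manifest).get? "sources").getD [])).items.filter
        (fun kv => pvMatches kv.2 t)).length ≤ 1)
instance (manifest : List (String × List (String × List (String × String)))) (tables : List String) : Decidable (Pre_get_source_from_name manifest tables) := by unfold Pre_get_source_from_name; infer_instance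

def pvWitness_get_source_from_name : (List (String × List (String × List (String × String)))) × List String :=
  ([("sources", [("src.tbl", [("database", "db"), ("schema", "sch"), ("name", "tbl"),
      ("source_name", "src")])])], ["db.sch.tbl", "other.t"])

def Spec_get_source_from_name (manifest : List (String × List (String × List (String × String)))) (tables : List String) (out : List (String × String)) : Prop := out = get_source_from_name_alt manifest tables
instance (manifest : List (String × List (String × List (String × String)))) (tables : List String) (out : List (String × String)) : Decidable (Spec_get_source_from_name manifest tables out) := by unfold Spec_get_source_from_name; infer_instance

-- ===== CLAIM (what is proved, stated in full; the proofs are below) =====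
def Claim_equal_get_source_from_name : Prop := ∀ (manifest : List (String × List (String × List (String × String)))) (tables : List String), Dom_get_source_from_name manifest tables → Pre_get_source_from_name manifest tables → Spec_get_source_from_name manifest tables (get_source_from_name manifest tables)

-- ===== LEMMAS AND PROOFS =====

-- "last match wins" loops, characterised by getLast? of a filter / filterMap
theorem lastPick {α β : Type} (p : α → Bool) (g : α → β) (l : List α) (acc : Option β) :
    l.foldl (fun tb x => if p x then some (g x) else tb) acc
      = match (l.filter p).getLast? with | some x => some (g x) | none => acc := by
  induction l generalizing acc with
  | nil => rfl
  | cons a l ih =>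
    simp only [List.foldl_cons, List.filter_cons, ih]
    by_cases h : p a
    · simp only [h]
      cases hfl : (List.filter p l).getLast? with
      | some x => simp [List.getLast?_cons, hfl]
      | none =>
        have : List.filter p l = [] := List.getLast?_eq_none_iff.mp hfl
        simp [this]
    · simp [h]

theorem pickB_char (index : PySem.Dict (List String) String) (ss : List (List String))
    (acc : Option String) :
    ss.foldl (pvStep index) acc
      = match (ss.filterMap
          (fun s => index.get? (PySem.List.sorted s (fun x => x)))).getLast? with
        | some t => some t
        | none => acc := by
  induction ss generalizing acc with
  | nil => rfl
  | cons a l ih =>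
    simp only [List.foldl_cons, List.filterMap_cons, ih]
    cases ha : index.get? (PySem.List.sorted a (fun x => x)) with
    | none => simp only [pvStep, ha]
    | some t =>
      simp only [pvStep, ha]
      cases hfl : (List.filterMap (fun s => index.get? (PySem.List.sorted s (fun x => x))) l).getLast? with
      | some x => simp [List.getLast?_cons, hfl]
      | none =>
        have : List.filterMap (fun s => index.get? (PySem.List.sorted s (fun x => x))) l = [] :=
          List.getLast?_eq_none_iff.mp hfl
        simp [this]

-- lookup in a dict built by a fold of key/value inserts: the last binding wins
theorem dictFoldGet {κ ν β : Type} [BEq κ] [LawfulBEq κ] (key : β → κ) (f : β → ν)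
    (l : List β) (d : PySem.Dict κ ν) (q : κ) :
    (l.foldl (fun d t => d.insert (key t) (f t)) d).get? q
      = match (l.filter (fun t => key t == q)).getLast? with
        | some t => some (f t)
        | none => d.get? q := by
  induction l generalizing d with
  | nil => rfl
  | cons a l ih =>
    simp only [List.foldl_cons, List.filter_cons, ih]
    by_cases h : key a == q
    · have hq : q = key a := (eq_of_beq h).symm
      simp only [h]
      cases hfl : (List.filter (fun t => key t == q) l).getLast? with
      | some x => simp [List.getLast?_cons, hfl]
      | none =>
        have : List.filter (fun t => key t == q) l = [] := List.getLast?_eq_none_iff.mp hfl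
        subst hq
        simp [this, PySem.Dict.get?_insert_self]
    · have hne : q ≠ key a := fun e => h (by simp [e])
      simp [h, PySem.Dict.get?_insert_of_ne _ _ hne]

theorem getLast?_all_eq {α : Type} (l : List α) (m : α) (hne : l ≠ [])
    (hall : ∀ x ∈ l, x = m) : l.getLast? = some m := by
  cases hl : l.getLast? with
  | none => exact absurd (List.getLast?_eq_none_iff.mp hl) hne
  | some x =>
    have hx : x ∈ l := List.mem_of_getLast? hl
    rw [hall x hx]

-- B's subset enumeration produces exactly the sublists of `fields`
theorem subsets_sound (fields : List String) (s : List String)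
    (hs : s ∈ pvSubsets fields) : s.Sublist fields := by
  unfold pvSubsets at hs
  induction fields using List.reverseRecOn generalizing s with
  | nil => simp at hs; simp [hs]
  | append_singleton fs f ih =>
    rw [List.foldl_append] at hs
    simp only [List.foldl_cons, List.foldl_nil, List.mem_append, List.mem_map] at hs
    rcases hs with hs | ⟨s', hs', rfl⟩
    · exact (ih s hs).trans (List.sublist_append_left fs [f])
    · exact (ih s' hs').append (List.Sublist.refl [f])

theorem subsets_complete (fields : List String) (s : List String)
    (hs : s.Sublist fields) : s ∈ pvSubsets fields := by
  unfold pvSubsets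
  induction fields using List.reverseRecOn generalizing s with
  | nil => simp at hs; simp [hs]
  | append_singleton fs f ih =>
    rw [List.foldl_append]
    simp only [List.foldl_cons, List.foldl_nil, List.mem_append, List.mem_map]
    rcases List.sublist_append_iff.mp hs with ⟨l₁, l₂, rfl, h₁, h₂⟩
    rcases List.sublist_singleton.mp h₂ with rfl | rfl
    · exact Or.inl (by simpa using ih l₁ h₁)
    · exact Or.inr ⟨l₁, ih l₁ h₁, rfl⟩

theorem mem_pvKey (t x : String) : x ∈ pvKey t ↔ x ∈ pvSplitDot t := by
  unfold pvKey
  rw [PySem.List.mem_sorted, PySem.Set.mem_ofList]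

theorem pairwise_lt_pvKey (t : String) : (pvKey t).Pairwise (· < ·) :=
  PySem.List.sorted_ofList_pairwise_lt (pvSplitDot t)

theorem nodup_pvKey (t : String) : (pvKey t).Nodup :=
  (pairwise_lt_pvKey t).imp (fun h => ne_of_lt h)

-- the dedup-accumulate step of pvFields
theorem fieldsAux_mem {opts : List (Option String)} {fs0 : List String} (x : String) :
    x ∈ opts.foldl (fun fs o => match o with
      | some f => if fs.contains f then fs else fs ++ [f]
      | none => fs) fs0 ↔ x ∈ fs0 ∨ some x ∈ opts := by
  induction opts generalizing fs0 with
  | nil => simp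
  | cons o l ih =>
    cases o with
    | none =>
      rw [List.foldl_cons, ih]
      simp
    | some f =>
      rw [List.foldl_cons]
      show x ∈ l.foldl _ (if fs0.contains f then fs0 else fs0 ++ [f]) ↔ _
      have hf : some x ∈ (some f :: l : List (Option String)) ↔ x = f ∨ some x ∈ l := by simp
      by_cases h : fs0.contains f
      · rw [if_pos h, ih, hf]
        have hmem : f ∈ fs0 := by simpa using h
        constructor
        · rintro (h' | h') <;> tauto
        · rintro (h' | h' | h')
          · tauto
          · subst h'; tauto
          · tauto
      · rw [if_neg h, ih, hf]
        simp only [List.mem_append, List.mem_singleton]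
        tauto

theorem fieldsAux_nodup {opts : List (Option String)} {fs0 : List String} (h0 : fs0.Nodup) :
    (opts.foldl (fun fs o => match o with
      | some f => if fs.contains f then fs else fs ++ [f]
      | none => fs) fs0).Nodup := by
  induction opts generalizing fs0 with
  | nil => exact h0
  | cons o l ih =>
    cases o with
    | none => exact ih h0
    | some f =>
      rw [List.foldl_cons]
      show (l.foldl _ (if fs0.contains f then fs0 else fs0 ++ [f])).Nodup
      by_cases h : fs0.contains f
      · rw [if_pos h]; exact ih h0
      · rw [if_neg h]
        have hf : f ∉ fs0 := by simpa using h
        refine ih ?_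
        exact List.Nodup.append h0 (List.nodup_singleton f)
          (by simpa [List.disjoint_singleton] using hf)

theorem mem_pvFields (value : List (String × String)) (x : String) :
    x ∈ pvFields value ↔
      (some x) ∈ [(PySem.Dict.mk value).get? "database", (PySem.Dict.mk value).get? "schema",
        (PySem.Dict.mk value).get? "name"] := by
  unfold pvFields
  rw [fieldsAux_mem]
  simp

theorem nodup_pvFields (value : List (String × String)) : (pvFields value).Nodup :=
  fieldsAux_nodup (by simp)

-- A's superset test is exactly pvMatches
theorem issuperset_eq_pvMatches (value : List (String × String)) (t : String) :
    PySem.Set.issuperset (pvSourceSet value) ((PySem.Set.ofList (pvSplitDot t)).map some)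
      = pvMatches value t := by
  rw [Bool.eq_iff_iff]
  simp only [PySem.Set.issuperset, PySem.Set.issubset, PySem.Set.contains, pvMatches, pvSourceSet,
    List.all_eq_true, List.mem_map, List.contains_iff_mem, PySem.Set.mem_ofList]
  constructor
  · intro h x hx
    simpa using h (some x) ⟨x, hx, rfl⟩
  · rintro h y ⟨x, hx, rfl⟩
    simpa using h x hx

theorem pvTableNames_items (tables : List String) :
    (pvTableNames tables).items
      = (PySem.Set.ofList tables).map (fun t => (t, PySem.Set.ofList (pvSplitDot t))) := by
  have hkeys : (pvTableNames tables).keys = PySem.Set.ofList tables := by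
    unfold pvTableNames
    have h := PySem.Dict.keys_foldl_insert_key tables (fun t => t)
      (fun _ t => PySem.Set.ofList (pvSplitDot t)) PySem.Dict.empty
    simpa using h
  have hnd : (pvTableNames tables).keys.Nodup := by
    rw [hkeys]; exact PySem.Set.nodup_ofList tables
  rw [PySem.Dict.items_eq_map_keys _ hnd [], hkeys]
  apply List.map_congr_left
  intro k hk
  have hk' : k ∈ tables := (PySem.Set.mem_ofList _ _).mp hk
  have hget : (pvTableNames tables).get? k = some (PySem.Set.ofList (pvSplitDot k)) := by
    unfold pvTableNames
    rw [dictFoldGet (fun t => t) (fun t => PySem.Set.ofList (pvSplitDot t))]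
    cases hfl : (tables.filter (fun t => t == k)).getLast? with
    | some t =>
      have ht : t ∈ tables.filter (fun t => t == k) := List.mem_of_getLast? hfl
      have : t = k := by simpa using (List.mem_filter.mp ht).2
      simp [this]
    | none =>
      have h0 : tables.filter (fun t => t == k) = [] := List.getLast?_eq_none_iff.mp hfl
      have hkin : k ∈ tables.filter (fun t => t == k) := List.mem_filter.mpr ⟨hk', by simp⟩
      rw [h0] at hkin
      cases hkin
  simp [PySem.Dict.getD, hget]

-- lookup in B's index: the last table in `tables` with that key
theorem pvIndex_get (tables : List String) (q : List String) :
    (pvIndex tables).get? q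
      = match (tables.filter (fun t => pvKey t == q)).getLast? with
        | some t => some t
        | none => none := by
  unfold pvIndex
  rw [dictFoldGet pvKey (fun t => t)]
  cases (tables.filter (fun t => pvKey t == q)).getLast? <;> rfl

-- pvMatches spelled out
theorem pvMatches_iff (value : List (String × String)) (t : String) :
    pvMatches value t = true ↔ ∀ x ∈ pvSplitDot t, x ∈ pvFields value := by
  unfold pvMatches
  rw [List.all_eq_true]
  constructor
  · intro h x hx
    exact (mem_pvFields value x).mpr (by simpa using h x hx)
  · intro h x hx
    simpa using (mem_pvFields value x).mp (h x hx)

-- any table delivered by B's index probes is a matching table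
theorem memY_matches (tables : List String) (value : List (String × String)) (y : String)
    (hy : y ∈ (pvSubsets (pvFields value)).filterMap
      (fun s => (pvIndex tables).get? (PySem.List.sorted s (fun x => x)))) :
    y ∈ tables ∧ pvMatches value y = true := by
  rcases List.mem_filterMap.mp hy with ⟨s, hs, hget⟩
  rw [pvIndex_get] at hget
  cases hfl : (tables.filter (fun t => pvKey t == PySem.List.sorted s (fun x => x))).getLast? with
  | none => rw [hfl] at hget; cases hget
  | some t =>
    rw [hfl] at hget
    injection hget with hty
    subst hty
    have ht := List.mem_of_getLast? hfl
    have htt := (List.mem_filter.mp ht).1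
    have hkey : pvKey t = PySem.List.sorted s (fun x => x) := by
      simpa using (List.mem_filter.mp ht).2
    refine ⟨htt, (pvMatches_iff value t).mpr ?_⟩
    intro x hx
    have hxk : x ∈ pvKey t := (mem_pvKey t x).mpr hx
    rw [hkey, PySem.List.mem_sorted] at hxk
    exact (subsets_sound _ s hs).subset hxk

-- the per-source choices agree whenever at most one table matches the source
theorem pick_eq (tables : List String) (value : List (String × String))
    (h1 : (tables.filter (fun t => pvMatches value t)).length ≤ 1) :
    pvPickA (pvTableNames tables) value = pvPickB (pvIndex tables) value := by
  have uniq : ∀ a b, a ∈ tables → pvMatches value a = true → b ∈ tables →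
      pvMatches value b = true → a = b := by
    intro a b ha hma hb hmb
    have ha' : a ∈ tables.filter (fun t => pvMatches value t) := List.mem_filter.mpr ⟨ha, hma⟩
    have hb' : b ∈ tables.filter (fun t => pvMatches value t) := List.mem_filter.mpr ⟨hb, hmb⟩
    cases hM : tables.filter (fun t => pvMatches value t) with
    | nil => rw [hM] at ha'; cases ha'
    | cons x xs =>
      cases xs with
      | nil =>
        rw [hM] at ha' hb'
        simp only [List.mem_singleton] at ha' hb'
        rw [ha', hb']
      | cons y ys =>
        rw [hM] at h1
        simp at h1
  unfold pvPickA pvPickB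
  rw [pvTableNames_items, List.foldl_map]
  rw [lastPick (fun t => PySem.Set.issuperset (pvSourceSet value)
    ((PySem.Set.ofList (pvSplitDot t)).map some)) (fun t : String => t)]
  rw [pickB_char]
  rw [List.filter_congr (fun t _ => issuperset_eq_pvMatches value t)]
  by_cases hex : ∃ m ∈ tables, pvMatches value m = true
  · rcases hex with ⟨m, hm, hmm⟩
    have hXall : ∀ x ∈ (PySem.Set.ofList tables).filter (fun t => pvMatches value t), x = m := by
      intro x hx
      have hx' := List.mem_filter.mp hx
      exact uniq x m ((PySem.Set.mem_ofList _ _).mp hx'.1) hx'.2 hm hmm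
    have hXne : (PySem.Set.ofList tables).filter (fun t => pvMatches value t) ≠ [] :=
      List.ne_nil_of_mem (List.mem_filter.mpr ⟨(PySem.Set.mem_ofList _ _).mpr hm, hmm⟩)
    have hLsub : ∀ x ∈ pvKey m, x ∈ pvFields value := by
      intro x hx
      exact (pvMatches_iff value m).mp hmm x ((mem_pvKey m x).mp hx)
    have hs₀ : (pvFields value).filter (fun f => (pvKey m).contains f)
        ∈ pvSubsets (pvFields value) :=
      subsets_complete _ _ List.filter_sublist
    have hsort : PySem.List.sorted
        ((pvFields value).filter (fun f => (pvKey m).contains f)) (fun x => x) = pvKey m := by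
      apply PySem.List.sorted_eq_of_perm_of_pairwise_lt _ _ _ ?_ (pairwise_lt_pvKey m)
      rw [List.perm_ext_iff_of_nodup (nodup_pvKey m)
        (List.Nodup.filter _ (nodup_pvFields value))]
      intro a
      simp only [List.mem_filter, List.contains_iff_mem]
      exact ⟨fun ha => ⟨hLsub a ha, ha⟩, fun ha => ha.2⟩
    have hYne : (pvSubsets (pvFields value)).filterMap
        (fun s => (pvIndex tables).get? (PySem.List.sorted s (fun x => x))) ≠ [] := by
      have hmf : m ∈ tables.filter (fun t => pvKey t == pvKey m) :=
        List.mem_filter.mpr ⟨hm, by simp⟩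
      have hget : ∃ t₀, (pvIndex tables).get?
          (PySem.List.sorted ((pvFields value).filter (fun f => (pvKey m).contains f))
            (fun x => x)) = some t₀ := by
        rw [hsort, pvIndex_get]
        cases hfl : (tables.filter (fun t => pvKey t == pvKey m)).getLast? with
        | none =>
          rw [List.getLast?_eq_none_iff.mp hfl] at hmf
          cases hmf
        | some t => exact ⟨t, rfl⟩
      rcases hget with ⟨t₀, hget⟩
      exact List.ne_nil_of_mem (List.mem_filterMap.mpr ⟨_, hs₀, hget⟩)
    have hYall : ∀ y ∈ (pvSubsets (pvFields value)).filterMap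
        (fun s => (pvIndex tables).get? (PySem.List.sorted s (fun x => x))), y = m := by
      intro y hy
      have h' := memY_matches tables value y hy
      exact uniq y m h'.1 h'.2 hm hmm
    rw [getLast?_all_eq _ m hXne hXall, getLast?_all_eq _ m hYne hYall]
  · push_neg at hex
    have hX : (PySem.Set.ofList tables).filter (fun t => pvMatches value t) = [] := by
      apply List.filter_eq_nil_iff.mpr
      intro a ha hma
      exact absurd hma (by simpa using hex a ((PySem.Set.mem_ofList _ _).mp ha))
    have hY : (pvSubsets (pvFields value)).filterMap
        (fun s => (pvIndex tables).get? (PySem.List.sorted s (fun x => x))) = [] := by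
      apply List.eq_nil_iff_forall_not_mem.mpr
      intro y hy
      have h' := memY_matches tables value y hy
      exact absurd h'.2 (by simpa using hex y h'.1)
    rw [hX, hY]
    rfl

-- with no tables, B's index is empty and B emits nothing
theorem pickB_nil (value : List (String × String)) : pvPickB (pvIndex []) value = none := by
  unfold pvPickB
  rw [pickB_char]
  have h : (pvSubsets (pvFields value)).filterMap
      (fun s => (pvIndex []).get? (PySem.List.sorted s (fun x => x))) = [] := by
    apply List.filterMap_eq_nil_iff.mpr
    intro s _
    rfl
  rw [h]
  rfl

theorem foldl_emit_nil (l : List (List (String × String))) (acc : List (String × String)) :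
    l.foldl (fun acc value => pvEmit (pvPickB (pvIndex []) value) value acc) acc = acc := by
  induction l generalizing acc with
  | nil => rfl
  | cons v l ih =>
    rw [List.foldl_cons, pickB_nil]
    exact ih acc

-- ===== VERDICT (by name: the statement is the Claim_ definition above) =====
theorem get_source_from_name_spec : Claim_equal_get_source_from_name := by
  intro manifest tables _ hpre
  unfold Spec_get_source_from_name get_source_from_name get_source_from_name_alt
  by_cases hemp : tables.isEmpty
  · rw [if_pos hemp]
    have htn : tables = [] := List.isEmpty_iff.mp hemp
    subst htn
    exact (foldl_emit_nil _ _).symm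
  · rw [if_neg hemp]
    show (PySem.Dict.mk (((PySem.Dict.mk manifest).get? "sources").getD [])).items.foldl
        (fun acc kv => pvEmit (pvPickA (pvTableNames tables) kv.2) kv.2 acc) []
      = (PySem.Dict.mk (((PySem.Dict.mk manifest).get? "sources").getD [])).values.foldl
        (fun acc value => pvEmit (pvPickB (pvIndex tables) value) value acc) []
    have hv : (PySem.Dict.mk (((PySem.Dict.mk manifest).get? "sources").getD [])).values
        = ((PySem.Dict.mk (((PySem.Dict.mk manifest).get? "sources").getD [])).items).map
          (fun kv => kv.2) := rfl
    rw [hv, List.foldl_map]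
    exact PySem.List.foldl_congr_mem _ _ _ _
      (fun acc kv hkv => by rw [pick_eq tables kv.2 (hpre.1 kv hkv)])
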